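-- pv_equiv track=rewrite | github.com/jso8910/advent_of_code_2022 | 2022/day_6/program.py | part_one
-- ===== SOURCE A (Python) =====
-- def part_one(file):
--     LEN_MARKER = 4
--     marker_end = 0
--     for i in range(len(file)):
--         if len(set(file[i:i+LEN_MARKER])) == LEN_MARKER:
--             marker_end = i + LEN_MARKER
--             break
--     return marker_end
-- ===== SOURCE B (Python) =====
-- def part_one(file):
--     # One pass, O(1) state: `start` is the left edge of the longest
--     # duplicate-free window ending at the current index.  A duplicate inside a
--     # 4-window can only be at lag 1, 2 or 3, so three direct character
--     # comparisons replace building a set over every 4-slice.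
--     start = 0
--     for i in range(len(file)):
--         c = file[i]
--         if i >= 1 and c == file[i - 1]:
--             start = max(start, i)
--         if i >= 2 and c == file[i - 2]:
--             start = max(start, i - 1)
--         if i >= 3 and c == file[i - 3]:
--             start = max(start, i - 2)
--         if i - start + 1 == 4:
--             return i + 1
--     return 0
-- ===== Notes on version B (the rewrite author's own statement) =====
-- stated objective: alternative
-- what changed: A rebuilds a set over the 4-character slice at every index; B makes one sliding-window pass keeping only the left edge of the current duplicate-free window, updated by three direct comparisons against the previous three characters (no slices, no sets).
import Mathlib
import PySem

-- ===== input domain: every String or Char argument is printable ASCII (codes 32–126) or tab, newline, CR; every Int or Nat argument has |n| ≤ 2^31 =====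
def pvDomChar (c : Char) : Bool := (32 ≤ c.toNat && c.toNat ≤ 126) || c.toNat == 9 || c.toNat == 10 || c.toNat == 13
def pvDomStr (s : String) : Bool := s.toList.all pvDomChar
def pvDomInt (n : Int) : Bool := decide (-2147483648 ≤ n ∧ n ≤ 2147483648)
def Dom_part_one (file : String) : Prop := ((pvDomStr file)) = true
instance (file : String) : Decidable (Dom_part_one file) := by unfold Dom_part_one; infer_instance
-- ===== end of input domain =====

-- B replaces A's per-index set-of-4-slice test by a single pass keeping only the left edge
-- of the current duplicate-free window (three direct lag comparisons); same return value, no speed claim.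

-- ===== PORT A =====
-- for i in range(len(file)): if len(set(file[i:i+4])) == 4: return i+4  (break + marker_end)
def part_one_loop (cs : List Char) : List Int → Int
  | [] => 0
  | i :: rest =>
      if PySem.Set.len (PySem.Set.ofList (PySem.List.slice cs (some i) (some (i + 4)))) = 4
      then i + 4
      else part_one_loop cs rest

def part_one (file : String) : Int :=
  part_one_loop file.toList (PySem.List.pyRange 0 (PySem.Str.len file) 1)

-- ===== PORT B =====
-- the three `if i >= lag and c == file[i-lag]: start = max(start, ...)` updates of Source B
def part_one_alt_upd1 (cs : List Char) (i s : Nat) : Nat :=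
  if 1 ≤ i ∧ cs.getD i ' ' = cs.getD (i - 1) ' ' then max s i else s

def part_one_alt_upd2 (cs : List Char) (i s : Nat) : Nat :=
  if 2 ≤ i ∧ cs.getD i ' ' = cs.getD (i - 2) ' ' then max s (i - 1) else s

def part_one_alt_upd3 (cs : List Char) (i s : Nat) : Nat :=
  if 3 ≤ i ∧ cs.getD i ' ' = cs.getD (i - 3) ' ' then max s (i - 2) else s

def part_one_alt_step (cs : List Char) (i start : Nat) : Nat :=
  part_one_alt_upd3 cs i (part_one_alt_upd2 cs i (part_one_alt_upd1 cs i start))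

def part_one_alt_loop (cs : List Char) : List Nat → Nat → Int
  | [], _ => 0
  | i :: rest, start =>
      let s := part_one_alt_step cs i start
      if i + 1 - s = 4 then (i : Int) + 1 else part_one_alt_loop cs rest s

def part_one_alt (file : String) : Int :=
  part_one_alt_loop file.toList (List.range file.toList.length) 0

-- ===== PRECONDITION & SPEC =====
def Spec_part_one (file : String) (out : Int) : Prop := out = part_one_alt file
instance (file : String) (out : Int) : Decidable (Spec_part_one file out) := by unfold Spec_part_one; infer_instance

-- ===== CLAIM (what is proved, stated in full; the proofs are below) =====
def Claim_equal_part_one : Prop := ∀ (file : String), Dom_part_one file → Spec_part_one file (part_one file)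

-- ===== LEMMAS AND PROOFS =====

-- common reference function: first index k whose 4-window is pairwise distinct, as k+4, else 0
def spec4 : List Char → Nat → Int
  | a :: b :: c :: d :: rest, k =>
      if a ≠ b ∧ a ≠ c ∧ a ≠ d ∧ b ≠ c ∧ b ≠ d ∧ c ≠ d then (k : Int) + 4
      else spec4 (b :: c :: d :: rest) (k + 1)
  | _, _ => 0
termination_by l _ => l.length

lemma spec4_short (l : List Char) (k : Nat) (h : l.length < 4) : spec4 l k = 0 := by
  match l with
  | [] => simp [spec4]
  | [a] => simp [spec4]
  | [a, b] => simp [spec4]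
  | [a, b, c] => simp [spec4]
  | a :: b :: c :: d :: r => simp at h; omega

lemma four_of_len (l : List Char) (h : 4 ≤ l.length) : ∃ a b c d r, l = a :: b :: c :: d :: r := by
  match l with
  | a :: b :: c :: d :: r => exact ⟨a, b, c, d, r, rfl⟩
  | [] => simp at h
  | [a] => simp at h
  | [a, b] => simp at h
  | [a, b, c] => simp at h

lemma set4_iff (a b c d : Char) :
    (PySem.Set.len (PySem.Set.ofList [a, b, c, d]) = 4) ↔
      (a ≠ b ∧ a ≠ c ∧ a ≠ d ∧ b ≠ c ∧ b ≠ d ∧ c ≠ d) := by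
  simp [PySem.Set.ofList, PySem.Set.add, PySem.Set.len, PySem.Set.contains, PySem.Set.empty,
    List.foldl]
  split_ifs <;> simp_all <;> tauto

lemma setlen_short (l : List Char) (h : l.length < 4) :
    ¬ PySem.Set.len (PySem.Set.ofList l) = 4 := by
  match l with
  | [] => decide
  | [a] =>
    simp [PySem.Set.ofList, PySem.Set.add, PySem.Set.len, PySem.Set.contains, PySem.Set.empty,
      List.foldl]
  | [a, b] =>
    simp [PySem.Set.ofList, PySem.Set.add, PySem.Set.len, PySem.Set.contains, PySem.Set.empty,
      List.foldl]
    split_ifs <;> simp_all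
  | [a, b, c] =>
    simp [PySem.Set.ofList, PySem.Set.add, PySem.Set.len, PySem.Set.contains, PySem.Set.empty,
      List.foldl]
    split_ifs <;> simp_all
  | a :: b :: c :: d :: r => simp at h; omega

lemma getD_drop (cs : List Char) (k j : Nat) :
    (cs.drop k).getD j ' ' = cs.getD (k + j) ' ' := by
  simp [List.getD_eq_getElem?_getD, List.getElem?_drop]

lemma window_dup (a b c d : Char) (r : List Char) (j1 j2 : Nat) (h1 : j1 < j2) (h2 : j2 ≤ 3)
    (he : (a :: b :: c :: d :: r).getD j1 ' ' = (a :: b :: c :: d :: r).getD j2 ' ') :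
    ¬ (a ≠ b ∧ a ≠ c ∧ a ≠ d ∧ b ≠ c ∧ b ≠ d ∧ c ≠ d) := by
  interval_cases j2 <;> interval_cases j1 <;> simp_all

-- ===== A = spec4 =====
lemma aLoop_spec (cs : List Char) :
    ∀ m i : Nat, i + m = cs.length →
      part_one_loop cs (PySem.List.pyRange (i : Int) (cs.length : Int) 1) =
        spec4 (cs.drop i) i := by
  intro m
  induction m with
  | zero =>
      intro i hi
      rw [PySem.List.pyRange_one_eq_nil (by omega)]
      have : cs.drop i = [] := List.drop_of_length_le (by omega)
      simp [part_one_loop, this, spec4]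
  | succ m ih =>
      intro i hi
      have hlt : (i : Int) < (cs.length : Int) := by omega
      rw [PySem.List.pyRange_one_cons hlt]
      have hsl : PySem.List.slice cs (some (i : Int)) (some ((i : Int) + 4)) =
          (cs.drop i).take 4 := by
        have := PySem.List.slice_natCast_add cs i 4
        push_cast at this
        exact this
      have hrest : (i : Int) + 1 = ((i + 1 : Nat) : Int) := by push_cast; ring
      by_cases h4 : 4 ≤ (cs.drop i).length
      · obtain ⟨a, b, c, d, r, ht⟩ := four_of_len _ h4
        have htake : (cs.drop i).take 4 = [a, b, c, d] := by rw [ht]; rfl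
        by_cases hdis : a ≠ b ∧ a ≠ c ∧ a ≠ d ∧ b ≠ c ∧ b ≠ d ∧ c ≠ d
        · simp only [part_one_loop]
          rw [if_pos (show PySem.Set.len (PySem.Set.ofList
              (PySem.List.slice cs (some (i : Int)) (some ((i : Int) + 4)))) = 4 from by
            rw [hsl, htake]; exact (set4_iff a b c d).mpr hdis)]
          rw [ht]
          simp only [spec4, if_pos hdis]
        · have hset : ¬ PySem.Set.len (PySem.Set.ofList
              (PySem.List.slice cs (some (i : Int)) (some ((i : Int) + 4)))) = 4 := by
            rw [hsl, htake]; exact fun h => hdis ((set4_iff a b c d).mp h)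
          have hdrop : cs.drop (i + 1) = b :: c :: d :: r := by
            rw [← List.tail_drop, ht]; rfl
          simp only [part_one_loop]
          rw [if_neg hset]
          rw [hrest, ih (i + 1) (by omega), ht, hdrop]
          simp only [spec4, if_neg hdis]
      · have h4' : cs.length - i < 4 := by
          rw [← List.length_drop]; omega
        have hset : ¬ PySem.Set.len (PySem.Set.ofList
            (PySem.List.slice cs (some (i : Int)) (some ((i : Int) + 4)))) = 4 := by
          rw [hsl]
          apply setlen_short
          rw [List.length_take, List.length_drop]
          omega
        simp only [part_one_loop]
        rw [if_neg hset]
        rw [hrest, ih (i + 1) (by omega)]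
        rw [spec4_short _ _ (by rw [List.length_drop]; omega),
          spec4_short _ _ (by rw [List.length_drop]; omega)]

-- ===== properties of B's step =====
lemma upd2_ge (cs : List Char) (i s : Nat) : s ≤ part_one_alt_upd2 cs i s := by
  unfold part_one_alt_upd2; split_ifs <;> omega

lemma upd3_ge (cs : List Char) (i s : Nat) : s ≤ part_one_alt_upd3 cs i s := by
  unfold part_one_alt_upd3; split_ifs <;> omega

lemma step_bounds (cs : List Char) (i start : Nat) (h : start ≤ i) :
    start ≤ part_one_alt_step cs i start ∧ part_one_alt_step cs i start ≤ i := by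
  unfold part_one_alt_step part_one_alt_upd1 part_one_alt_upd2 part_one_alt_upd3
  split_ifs <;> omega

lemma step_capture (cs : List Char) (i start lag : Nat) (h1 : 1 ≤ lag) (h2 : lag ≤ 3)
    (h3 : lag ≤ i) (he : cs.getD i ' ' = cs.getD (i - lag) ' ') :
    i - lag + 1 ≤ part_one_alt_step cs i start := by
  unfold part_one_alt_step
  interval_cases lag
  · have h : i - 1 + 1 ≤ part_one_alt_upd1 cs i start := by
      unfold part_one_alt_upd1; rw [if_pos ⟨h3, he⟩]; omega
    calc i - 1 + 1 ≤ part_one_alt_upd1 cs i start := h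
      _ ≤ part_one_alt_upd2 cs i (part_one_alt_upd1 cs i start) := upd2_ge ..
      _ ≤ _ := upd3_ge ..
  · have h : i - 2 + 1 ≤ part_one_alt_upd2 cs i (part_one_alt_upd1 cs i start) := by
      unfold part_one_alt_upd2; rw [if_pos ⟨h3, he⟩]; omega
    calc i - 2 + 1 ≤ part_one_alt_upd2 cs i (part_one_alt_upd1 cs i start) := h
      _ ≤ _ := upd3_ge ..
  · unfold part_one_alt_upd3; rw [if_pos ⟨h3, he⟩]; omega

lemma upd1_cases (cs : List Char) (i s : Nat) :
    part_one_alt_upd1 cs i s = s ∨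
      (1 ≤ i ∧ cs.getD i ' ' = cs.getD (i - 1) ' ' ∧ part_one_alt_upd1 cs i s = i - 1 + 1) := by
  unfold part_one_alt_upd1
  split_ifs with h
  · rcases max_choice s i with h' | h'
    · exact Or.inl h'
    · exact Or.inr ⟨h.1, h.2, by omega⟩
  · exact Or.inl rfl

lemma upd2_cases (cs : List Char) (i s : Nat) :
    part_one_alt_upd2 cs i s = s ∨
      (2 ≤ i ∧ cs.getD i ' ' = cs.getD (i - 2) ' ' ∧ part_one_alt_upd2 cs i s = i - 2 + 1) := by
  unfold part_one_alt_upd2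
  split_ifs with h
  · rcases max_choice s (i - 1) with h' | h'
    · exact Or.inl h'
    · exact Or.inr ⟨h.1, h.2, by omega⟩
  · exact Or.inl rfl

lemma upd3_cases (cs : List Char) (i s : Nat) :
    part_one_alt_upd3 cs i s = s ∨
      (3 ≤ i ∧ cs.getD i ' ' = cs.getD (i - 3) ' ' ∧ part_one_alt_upd3 cs i s = i - 3 + 1) := by
  unfold part_one_alt_upd3
  split_ifs with h
  · rcases max_choice s (i - 2) with h' | h'
    · exact Or.inl h'
    · exact Or.inr ⟨h.1, h.2, by omega⟩
  · exact Or.inl rfl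

lemma step_cases (cs : List Char) (i start : Nat) :
    part_one_alt_step cs i start = start ∨
      ∃ lag, 1 ≤ lag ∧ lag ≤ 3 ∧ lag ≤ i ∧ cs.getD i ' ' = cs.getD (i - lag) ' ' ∧
        part_one_alt_step cs i start = i - lag + 1 := by
  unfold part_one_alt_step
  rcases upd3_cases cs i (part_one_alt_upd2 cs i (part_one_alt_upd1 cs i start)) with h3 | ⟨hg, he, hv⟩
  · rw [h3]
    rcases upd2_cases cs i (part_one_alt_upd1 cs i start) with h2 | ⟨hg, he, hv⟩
    · rw [h2]
      rcases upd1_cases cs i start with h1 | ⟨hg, he, hv⟩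
      · exact Or.inl h1
      · exact Or.inr ⟨1, by omega, by omega, hg, he, by omega⟩
    · exact Or.inr ⟨2, by omega, by omega, hg, he, by omega⟩
  · exact Or.inr ⟨3, by omega, by omega, hg, he, by omega⟩

-- ===== B = spec4 =====
lemma bLoop_spec (cs : List Char) :
    ∀ m i start : Nat, i + m = cs.length →
      start ≤ i → i ≤ start + 3 →
      (∀ p q, start ≤ p → p < q → q ≤ p + 3 → q < i → cs.getD p ' ' ≠ cs.getD q ' ') →
      (start = 0 ∨ ∃ q, q < i ∧ start ≤ q ∧ q ≤ start + 2 ∧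
          cs.getD (start - 1) ' ' = cs.getD q ' ') →
      part_one_alt_loop cs (List.range' i m) start = spec4 (cs.drop (i - 3)) (i - 3) := by
  intro m
  induction m with
  | zero =>
      intro i start hi _ _ _ _
      rw [spec4_short _ _ (by simp; omega)]
      rfl
  | succ m ih =>
      intro i start hi hsi his hnd hj
      rw [List.range'_succ]
      simp only [part_one_alt_loop]
      set s := part_one_alt_step cs i start with hs
      obtain ⟨hs1, hs2⟩ := step_bounds cs i start hsi
      -- no duplicate pair at or after s among processed indices (now including i)
      have hnd' : ∀ p q, s ≤ p → p < q → q ≤ p + 3 → q < i + 1 →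
          cs.getD p ' ' ≠ cs.getD q ' ' := by
        intro p q hp hpq hq3 hqi
        by_cases hq : q < i
        · exact hnd p q (le_trans hs1 hp) hpq hq3 hq
        · have hqi' : q = i := by omega
          intro heq
          have hcap := step_capture cs i start (i - p) (by omega) (by omega) (by omega)
            (by rw [show i - (i - p) = p by omega]; exact (hqi' ▸ heq).symm)
          omega
      have hj' : s = 0 ∨ ∃ q, q < i + 1 ∧ s ≤ q ∧ q ≤ s + 2 ∧
          cs.getD (s - 1) ' ' = cs.getD q ' ' := by
        rcases step_cases cs i start with h | ⟨lag, hl1, hl3, hli, he, hv⟩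
        · rw [hs, h]
          rcases hj with h0 | ⟨q, hq, h1, h2, h3⟩
          · exact Or.inl h0
          · exact Or.inr ⟨q, by omega, h1, h2, h3⟩
        · refine Or.inr ⟨i, by omega, by omega, by omega, ?_⟩
          rw [show s - 1 = i - lag by omega]
          exact he.symm
      by_cases htr : i + 1 - s = 4
      · -- trigger: the window [i-3, i] is the first distinct one
        rw [if_pos htr]
        have hi3 : 3 ≤ i := by omega
        obtain ⟨p0, rfl⟩ : ∃ p0, i = p0 + 3 := ⟨i - 3, by omega⟩
        have hsp0 : s = p0 := by omega
        have h4 : 4 ≤ (cs.drop p0).length := by simp; omega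
        obtain ⟨a, b, c, d, r, ht⟩ := four_of_len _ h4
        have hg : ∀ j : Nat, (a :: b :: c :: d :: r).getD j ' ' = cs.getD (p0 + j) ' ' := by
          intro j; rw [← ht]; exact getD_drop cs p0 j
        have e0 : cs.getD p0 ' ' = a := by have := hg 0; simpa using this.symm
        have e1 : cs.getD (p0 + 1) ' ' = b := by have := hg 1; simpa using this.symm
        have e2 : cs.getD (p0 + 2) ' ' = c := by have := hg 2; simpa using this.symm
        have e3 : cs.getD (p0 + 3) ' ' = d := by have := hg 3; simpa using this.symm
        have hdis : a ≠ b ∧ a ≠ c ∧ a ≠ d ∧ b ≠ c ∧ b ≠ d ∧ c ≠ d := by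
          refine ⟨?_, ?_, ?_, ?_, ?_, ?_⟩
          · have h := hnd' p0 (p0 + 1) (by omega) (by omega) (by omega) (by omega)
            rw [e0, e1] at h; exact h
          · have h := hnd' p0 (p0 + 2) (by omega) (by omega) (by omega) (by omega)
            rw [e0, e2] at h; exact h
          · have h := hnd' p0 (p0 + 3) (by omega) (by omega) (by omega) (by omega)
            rw [e0, e3] at h; exact h
          · have h := hnd' (p0 + 1) (p0 + 2) (by omega) (by omega) (by omega) (by omega)
            rw [e1, e2] at h; exact h
          · have h := hnd' (p0 + 1) (p0 + 3) (by omega) (by omega) (by omega) (by omega)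
            rw [e1, e3] at h; exact h
          · have h := hnd' (p0 + 2) (p0 + 3) (by omega) (by omega) (by omega) (by omega)
            rw [e2, e3] at h; exact h
        rw [show p0 + 3 - 3 = p0 by omega, ht]
        simp only [spec4, if_pos hdis]
        push_cast
        ring
      · -- no trigger: window [i-3, i] (if any) has a duplicate; advance
        rw [if_neg htr]
        have hs3 : i ≤ s + 2 ∨ i < 3 := by omega
        rw [ih (i + 1) s (by omega) (by omega) (by omega) hnd' hj']
        by_cases hi3 : 3 ≤ i
        · obtain ⟨p0, rfl⟩ : ∃ p0, i = p0 + 3 := ⟨i - 3, by omega⟩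
          have h4 : 4 ≤ (cs.drop p0).length := by simp; omega
          obtain ⟨a, b, c, d, r, ht⟩ := four_of_len _ h4
          have hg : ∀ j : Nat, (a :: b :: c :: d :: r).getD j ' ' = cs.getD (p0 + j) ' ' := by
            intro j; rw [← ht]; exact getD_drop cs p0 j
          -- the justification pair lies inside the window: not distinct
          have hdup : ¬ (a ≠ b ∧ a ≠ c ∧ a ≠ d ∧ b ≠ c ∧ b ≠ d ∧ c ≠ d) := by
            rcases hj' with h0 | ⟨q, hq1, hq2, hq3, heq⟩
            · omega
            · have hp : p0 ≤ s - 1 := by omega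
              refine window_dup a b c d r (s - 1 - p0) (q - p0) (by omega) (by omega) ?_
              rw [hg (s - 1 - p0), hg (q - p0),
                show p0 + (s - 1 - p0) = s - 1 by omega, show p0 + (q - p0) = q by omega]
              exact heq
          have hdrop : cs.drop (p0 + 1) = b :: c :: d :: r := by
            rw [← List.tail_drop, ht]; rfl
          rw [show p0 + 3 - 3 = p0 by omega, show p0 + 3 + 1 - 3 = p0 + 1 by omega,
            ht, hdrop]
          simp only [spec4, if_neg hdup]
        · rw [show i - 3 = 0 by omega, show i + 1 - 3 = 0 by omega]

-- ===== VERDICT (by name: the statement is the Claim_ definition above) =====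
theorem part_one_spec : Claim_equal_part_one := by
  intro file _
  unfold Spec_part_one part_one part_one_alt
  have hlen : PySem.Str.len file = (file.toList.length : Int) := by
    simp [PySem.Str.len_eq]
  rw [hlen, List.range_eq_range']
  have ha := aLoop_spec file.toList file.toList.length 0 (by omega)
  have hb := bLoop_spec file.toList file.toList.length 0 0 (by omega) (by omega) (by omega)
    (by intro p q _ _ _ h; omega) (Or.inl rfl)
  simp only [Nat.cast_zero] at ha
  rw [ha, hb]
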